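-- pv_equiv track=rewrite | github.com/yochaiz/darts-UNIQ | cnn/HtmlLogger.py | dictToRows
-- ===== SOURCE A (Python) =====
-- def dictToRows(dict, nElementPerRow):
--     rows = []
--     row = []
--     counter = 0
--     # sort elements by keys name
--     for k in sorted(dict.keys()):
--         v = dict[k]
--         row.append(k)
--         row.append(v)
--         counter += 1
--
--         if counter == nElementPerRow:
--             rows.append(row)
--             row = []
--             counter = 0
--
--     # add last elements
--     if len(row) > 0:
--         rows.append(row)
--
--     return rows
-- ===== SOURCE B (Python) =====
-- def dictToRows(dict, nElementPerRow):
--     flat = [x for k in sorted(dict) for x in (k, dict[k])]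
--     size = 2 * nElementPerRow
--     return [flat[i:i + size] for i in range(0, len(flat), size)]
-- ===== Notes on version B (the rewrite author's own statement) =====
-- stated objective: simpler
-- what changed: Replaces A's loop threading a rows/row/counter accumulator triple with a precompute-then-slice decomposition: build the sorted flattened key,value list once, then chunk it by slicing 2*nElementPerRow elements per row at each start index of range(0, len(flat), 2*nElementPerRow); Pre_ requires a positive nElementPerRow, a non-positive row capacity being a degenerate corner no caller specifies, where A emits one unbounded row while B raises for 0 (range step zero) and yields no rows for negatives.
-- outside the precondition, e.g. on dictToRows({'a': '1'}, 0): A returns [['a', '1']], B raises ValueError; on dictToRows({'a': '1'}, -1): A returns [['a', '1']], B returns []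
import Mathlib
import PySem

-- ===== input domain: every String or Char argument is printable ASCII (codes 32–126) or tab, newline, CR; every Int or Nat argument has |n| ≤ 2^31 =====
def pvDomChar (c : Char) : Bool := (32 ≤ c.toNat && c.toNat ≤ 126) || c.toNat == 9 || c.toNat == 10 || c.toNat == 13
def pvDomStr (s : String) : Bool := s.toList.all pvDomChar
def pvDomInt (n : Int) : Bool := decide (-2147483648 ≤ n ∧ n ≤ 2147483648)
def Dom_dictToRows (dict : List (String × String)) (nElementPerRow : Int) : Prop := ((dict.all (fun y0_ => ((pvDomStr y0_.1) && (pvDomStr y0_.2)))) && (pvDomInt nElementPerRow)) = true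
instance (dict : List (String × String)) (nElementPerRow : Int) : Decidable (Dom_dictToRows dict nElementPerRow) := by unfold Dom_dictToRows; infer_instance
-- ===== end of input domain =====

-- B replaces A's rows/row/counter accumulator loop by flatten-then-slice chunking over a range of start indices (objective: simpler).

-- ===== PORT A =====
-- Port of A's loop: fold over the sorted keys threading (rows, row, counter).
def dictToRows (dict : List (String × String)) (nElementPerRow : Int) : List (List String) :=
  let d := PySem.Dict.ofList dict
  let fin := (PySem.List.sorted d.keys (fun x => x) false).foldl
    (fun (st : List (List String) × List String × Int) k =>
      let rows := st.1
      let row := st.2.1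
      let counter := st.2.2
      let v := d.getD k ""          -- d[k]; k is drawn from d.keys, so the key is present
      let row := (row ++ [k]) ++ [v]
      let counter := counter + 1
      if counter = nElementPerRow then (rows ++ [row], ([] : List String), (0 : Int))
      else (rows, row, counter))
    (([] : List (List String)), ([] : List String), (0 : Int))
  if fin.2.1.length > 0 then fin.1 ++ [fin.2.1] else fin.1

-- ===== PORT B =====
-- Source B: flatten the sorted key/value pairs, then take slices of 2*nElementPerRow
-- at the start indices range(0, len(flat), size).
def dictToRows_alt (dict : List (String × String)) (nElementPerRow : Int) : List (List String) :=
  let d := PySem.Dict.ofList dict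
  let flat := (PySem.List.sorted d.keys (fun x => x) false).flatMap (fun k => [k, d.getD k ""])
  let size := 2 * nElementPerRow
  (PySem.List.pyRange 0 (flat.length : Int) size).map
    (fun i => PySem.List.slice flat (some i) (some (i + size)))

-- ===== PRECONDITION & SPEC =====
-- Pre_ requires a positive nElementPerRow: a non-positive row capacity is a degenerate corner
-- no caller specifies — A emits every pair as one unbounded row there, while B raises for 0
-- (range step zero) and yields no rows for negatives; either reading is defensible.
def Pre_dictToRows (dict : List (String × String)) (nElementPerRow : Int) : Prop :=
  1 ≤ nElementPerRow
instance (dict : List (String × String)) (nElementPerRow : Int) : Decidable (Pre_dictToRows dict nElementPerRow) := by unfold Pre_dictToRows; infer_instance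

def pvWitness_dictToRows : (List (String × String)) × Int := ([("a", "1"), ("b", "2")], 1)

def Spec_dictToRows (dict : List (String × String)) (nElementPerRow : Int) (out : List (List String)) : Prop := out = dictToRows_alt dict nElementPerRow
instance (dict : List (String × String)) (nElementPerRow : Int) (out : List (List String)) : Decidable (Spec_dictToRows dict nElementPerRow out) := by unfold Spec_dictToRows; infer_instance

-- ===== CLAIM (what is proved, stated in full; the proofs are below) =====
def Claim_equal_dictToRows : Prop := ∀ (dict : List (String × String)) (nElementPerRow : Int), Dom_dictToRows dict nElementPerRow → Pre_dictToRows dict nElementPerRow → Spec_dictToRows dict nElementPerRow (dictToRows dict nElementPerRow)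

-- ===== LEMMAS AND PROOFS =====

-- A's loop step, abstracted over the dict and the row bound
def pvStep (d : PySem.Dict String String) (n : Int)
    (st : List (List String) × List String × Int) (k : String) :
    List (List String) × List String × Int :=
  let rows := st.1
  let row := st.2.1
  let counter := st.2.2
  let v := d.getD k ""
  let row := (row ++ [k]) ++ [v]
  let counter := counter + 1
  if counter = n then (rows ++ [row], ([] : List String), (0 : Int))
  else (rows, row, counter)

def pvFlat (d : PySem.Dict String String) (ks : List String) : List String :=
  ks.flatMap (fun k => [k, d.getD k ""])

def pvFin (p : List (List String) × List String × Int) : List (List String) :=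
  if p.2.1.length > 0 then p.1 ++ [p.2.1] else p.1

-- chunking of a list into consecutive size-pieces; the common form both ports reduce to
def pvChunks (size : Int) : List String → List (List String)
  | [] => []
  | x :: rest =>
      (x :: (rest.take (size - 1).toNat))
        :: pvChunks size (rest.drop (size - 1).toNat)
termination_by xs => xs.length
decreasing_by simp

theorem flat_cons (d : PySem.Dict String String) (k : String) (ks : List String) :
    pvFlat d (k :: ks) = k :: d.getD k "" :: pvFlat d ks := by
  simp [pvFlat]

theorem pvChunks_nil (sz : Int) : pvChunks sz [] = [] := by
  rw [pvChunks.eq_def]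

theorem pvChunks_cons (sz : Int) (x : String) (rest : List String) :
    pvChunks sz (x :: rest) =
      (x :: rest.take (sz - 1).toNat) :: pvChunks sz (rest.drop (sz - 1).toNat) := by
  rw [pvChunks.eq_def]

theorem chunks_short (sz : Int) (row : List String) (hlen : (row.length : Int) ≤ sz)
    (hpos : 0 < sz) : pvChunks sz row = if row = [] then [] else [row] := by
  cases row with
  | nil => simp [pvChunks_nil]
  | cons x rest =>
      rw [pvChunks_cons]
      have h1 : rest.take (sz - 1).toNat = rest := by
        apply List.take_of_length_le
        simp at hlen; omega
      have h2 : rest.drop (sz - 1).toNat = [] := by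
        apply List.drop_eq_nil_of_le
        simp at hlen; omega
      rw [h1, h2, pvChunks_nil]
      simp

theorem chunks_append (sz : Int) (ys zs : List String) (hpos : 0 < sz)
    (hlen : (ys.length : Int) = sz) : pvChunks sz (ys ++ zs) = ys :: pvChunks sz zs := by
  cases ys with
  | nil => simp at hlen; omega
  | cons y ys' =>
      rw [List.cons_append, pvChunks_cons]
      have hy : ys'.length = (sz - 1).toNat := by simp at hlen; omega
      have h1 : (ys' ++ zs).take (sz - 1).toNat = ys' := by
        rw [← hy]; exact List.take_left ..
      have h2 : (ys' ++ zs).drop (sz - 1).toNat = zs := by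
        rw [← hy]; exact List.drop_left ..
      rw [h1, h2]

-- positive bound: A's loop computes chunking of the pending row plus the remaining flat list
theorem loop_pos (d : PySem.Dict String String) (n : Int) (hn : 0 < n) :
    ∀ (ks : List String) (rows : List (List String)) (row : List String) (c : Int),
      0 ≤ c → c < n → (row.length : Int) = 2 * c →
      pvFin (ks.foldl (pvStep d n) (rows, row, c)) = rows ++ pvChunks (2 * n) (row ++ pvFlat d ks) := by
  intro ks
  induction ks with
  | nil =>
      intro rows row c hc hcn hrow
      simp only [List.foldl_nil, pvFlat, List.flatMap_nil, List.append_nil]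
      rw [chunks_short (2 * n) row (by omega) (by omega)]
      rcases row with _ | ⟨x, rest⟩
      · simp [pvFin]
      · simp [pvFin]
  | cons k ks ih =>
      intro rows row c hc hcn hrow
      simp only [List.foldl_cons]
      by_cases hEq : c + 1 = n
      · simp only [pvStep, if_pos hEq]
        rw [ih _ _ _ le_rfl (by omega) (by simp)]
        simp only [List.nil_append]
        rw [flat_cons,
          show row ++ k :: d.getD k "" :: pvFlat d ks
              = ((row ++ [k]) ++ [d.getD k ""]) ++ pvFlat d ks by simp,
          chunks_append (2 * n) _ _ (by omega)
            (by simp only [List.length_append, List.length_cons, List.length_nil]; push_cast; omega)]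
        simp
      · simp only [pvStep, if_neg hEq]
        rw [ih _ _ _ (by omega) (by omega) (by simp; omega)]
        rw [flat_cons]
        simp

-- range with positive step: empty below a non-positive bound
theorem pyRange_nonpos (b s : Int) (hs : 0 < s) (hb : b ≤ 0) :
    PySem.List.pyRange 0 b s = [] := by
  rw [PySem.List.pyRange_of_pos _ _ hs, if_neg (by omega)]
  simp

-- range with positive step: peel the first index
theorem pyRange_pos_cons (b s : Int) (hs : 0 < s) (hb : 0 < b) :
    PySem.List.pyRange 0 b s = 0 :: PySem.List.pyRange s b s := by
  rw [PySem.List.pyRange_of_pos _ _ hs, PySem.List.pyRange_of_pos _ _ hs, if_pos hb]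
  have hdiv : (b - 0 + s - 1) / s = (b - 1) / s + 1 := by
    rw [show b - 0 + s - 1 = (b - 1) + 1 * s by ring, Int.add_mul_ediv_right _ _ (by omega)]
  have hd0 : 0 ≤ (b - 1) / s := Int.ediv_nonneg (by omega) (by omega)
  have hM : (if s < b then ((b - s + s - 1) / s).toNat else 0) = ((b - 1) / s).toNat := by
    split_ifs with h
    · congr 1; ring_nf
    · have : (b - 1) / s = 0 := Int.ediv_eq_zero_of_lt (by omega) (by omega)
      omega
  have hN : ((b - 0 + s - 1) / s).toNat = ((b - 1) / s).toNat + 1 := by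
    rw [hdiv]; omega
  rw [hM, hN, List.range_succ_eq_map]
  simp only [List.map_cons, List.map_map]
  congr 1
  · simp
  · apply List.map_congr_left
    intro a _
    simp [Function.comp, Nat.succ_eq_add_one]
    ring

-- shift a positive-step range starting at s down to one starting at 0
theorem pyRange_shift (b s : Int) (hs : 0 < s) :
    PySem.List.pyRange s b s = (PySem.List.pyRange 0 (b - s) s).map (· + s) := by
  rw [PySem.List.pyRange_of_pos _ _ hs, PySem.List.pyRange_of_pos _ _ hs, List.map_map]
  have hc : (if s < b then ((b - s + s - 1) / s).toNat else 0)
      = (if 0 < b - s then ((b - s - 0 + s - 1) / s).toNat else 0) := by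
    by_cases h : s < b
    · rw [if_pos h, if_pos (show (0:Int) < b - s by omega)]
      congr 2
      ring
    · rw [if_neg h, if_neg (show ¬(0:Int) < b - s by omega)]
  rw [hc]
  apply List.map_congr_left
  intro a _
  simp
  ring

-- B's range-of-slices form equals pvChunks
theorem rangeChunks (s : Int) (hs : 0 < s) (flat : List String) :
    (PySem.List.pyRange 0 (flat.length : Int) s).map
      (fun i => PySem.List.slice flat (some i) (some (i + s))) = pvChunks s flat := by
  suffices h : ∀ (n : Nat) (flat : List String), flat.length ≤ n →
      (PySem.List.pyRange 0 (flat.length : Int) s).map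
        (fun i => PySem.List.slice flat (some i) (some (i + s))) = pvChunks s flat from
    h flat.length flat le_rfl
  intro n
  induction n with
  | zero =>
      intro flat hf
      have : flat = [] := List.eq_nil_of_length_eq_zero (by omega)
      subst this
      simp [pyRange_nonpos _ s hs le_rfl, pvChunks_nil]
  | succ m ih =>
      intro flat hf
      cases flat with
      | nil => simp [pyRange_nonpos _ s hs le_rfl, pvChunks_nil]
      | cons x rest =>
          set L : Int := ((x :: rest).length : Int) with hL
          have hLpos : 0 < L := by simp [hL]
          rw [pyRange_pos_cons L s hs hLpos, List.map_cons]
          -- the head slice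
          have hhead : PySem.List.slice (x :: rest) (some 0) (some (0 + s))
              = x :: rest.take (s - 1).toNat := by
            rw [zero_add, PySem.List.slice_zero_start, PySem.List.slice_to _ (le_of_lt hs)]
            have : s.toNat = (s - 1).toNat + 1 := by omega
            rw [this, List.take_succ_cons]
          -- the tail
          have hrest' : rest.drop (s - 1).toNat = (x :: rest).drop s.toNat := by
            have : s.toNat = (s - 1).toNat + 1 := by omega
            rw [this, List.drop_succ_cons]
          set rest' := (x :: rest).drop s.toNat with hr
          have hlen' : (rest'.length : Int) = max (L - s) 0 := by
            simp [hr, hL]; omega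
          have hranges : PySem.List.pyRange 0 (L - s) s
              = PySem.List.pyRange 0 (rest'.length : Int) s := by
            by_cases hsl : s < L
            · congr 1; omega
            · rw [pyRange_nonpos _ _ hs (by omega), pyRange_nonpos _ _ hs (by omega)]
          have htail : (PySem.List.pyRange s L s).map
              (fun i => PySem.List.slice (x :: rest) (some i) (some (i + s)))
              = (PySem.List.pyRange 0 (rest'.length : Int) s).map
                (fun i => PySem.List.slice rest' (some i) (some (i + s))) := by
            rw [pyRange_shift L s hs, List.map_map, hranges]
            apply List.map_congr_left
            intro i hi
            have hi0 : 0 ≤ i := by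
              rcases (PySem.List.mem_pyRange_iff_of_pos hs i).mp hi with ⟨h1, _, _⟩
              exact h1
            -- slice flat (i+s) (i+s+s) = slice (flat.drop s) i (i+s), all indices ≥ 0
            have hi' : i = ((i.toNat : Nat) : Int) := by omega
            have hs' : s = ((s.toNat : Nat) : Int) := by omega
            simp only [Function.comp]
            rw [hi', hs', hr]
            rw [show ((i.toNat : Nat) : Int) + ((s.toNat : Nat) : Int)
                = ((i.toNat + s.toNat : Nat) : Int) by push_cast; ring]
            rw [PySem.List.slice_natCast_add (x :: rest) (i.toNat + s.toNat) s.toNat]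
            rw [Nat.cast_add]
            rw [PySem.List.slice_natCast_add ((x :: rest).drop s.toNat) i.toNat s.toNat]
            rw [List.drop_drop]
            congr 2
            omega
          rw [hhead, htail, ih rest' (by
            rw [hr]
            simp only [List.length_drop, List.length_cons]
            have hbc : (x :: rest).length = rest.length + 1 := rfl
            simp only [List.length_cons] at hf
            omega), pvChunks_cons, hrest']

-- ===== VERDICT (by name: the statement is the Claim_ definition above) =====
theorem dictToRows_spec : Claim_equal_dictToRows := by
  intro dict n _ hpre
  unfold Spec_dictToRows dictToRows dictToRows_alt
  set d := PySem.Dict.ofList dict with hd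
  set ks := PySem.List.sorted d.keys (fun x => x) false with hks
  have hn : 0 < n := hpre
  show pvFin (ks.foldl (pvStep d n) ([], [], 0)) =
    (PySem.List.pyRange 0 ((pvFlat d ks).length : Int) (2 * n)).map
      (fun i => PySem.List.slice (pvFlat d ks) (some i) (some (i + 2 * n)))
  rw [rangeChunks (2 * n) (by omega) (pvFlat d ks)]
  rw [loop_pos d n hn ks [] [] 0 le_rfl (by omega) (by simp)]
  simp
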